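-- pv_equiv track=rewrite | github.com/Fidget-Spinner/trace-analyzer | src/test/good_input.py | foo
-- ===== SOURCE A (Python) =====
-- def foo(x, loops):
--     x = 0
--     for i in range(loops):
--         # Uncommon branch
--         if i % 654:
--             x = i + 10
--         else:
--             x = i + 1
--     return x
-- ===== SOURCE B (Python) =====
-- def foo(x, loops):
--     # Only the last iteration matters: the loop body overwrites x unconditionally.
--     if loops <= 0:
--         return 0
--     i = loops - 1
--     return i + (1 if i % 654 == 0 else 10)
-- ===== Notes on version B (the rewrite author's own statement) =====
-- stated objective: faster
-- what changed: Replaces the O(loops) loop with an O(1) closed form evaluating only the last iteration, since each iteration overwrites x.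
import Mathlib
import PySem

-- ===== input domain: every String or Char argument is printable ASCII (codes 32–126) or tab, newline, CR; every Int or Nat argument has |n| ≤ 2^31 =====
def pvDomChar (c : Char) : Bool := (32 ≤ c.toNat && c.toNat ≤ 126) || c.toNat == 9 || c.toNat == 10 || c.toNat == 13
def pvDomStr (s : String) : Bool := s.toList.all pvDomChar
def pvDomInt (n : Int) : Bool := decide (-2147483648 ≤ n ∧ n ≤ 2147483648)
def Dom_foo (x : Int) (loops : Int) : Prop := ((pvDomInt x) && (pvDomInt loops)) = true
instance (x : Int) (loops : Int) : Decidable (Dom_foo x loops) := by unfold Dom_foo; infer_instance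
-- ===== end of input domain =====

-- ===== PORT A =====
-- Literal port of A: fold over range(loops), overwriting x each iteration.
def foo (x : Int) (loops : Int) : Int :=
  (PySem.List.pyRange 0 loops 1).foldl
    (fun _ i => if PySem.Int.mod i 654 ≠ 0 then i + 10 else i + 1) 0

-- ===== PORT B =====
-- B: O(1) closed form — only the last iteration matters.
def foo_alt (x : Int) (loops : Int) : Int :=
  if loops ≤ 0 then 0
  else (loops - 1) + (if PySem.Int.mod (loops - 1) 654 = 0 then 1 else 10)

-- ===== PRECONDITION & SPEC =====
def Spec_foo (x : Int) (loops : Int) (out : Int) : Prop := out = foo_alt x loops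
instance (x : Int) (loops : Int) (out : Int) : Decidable (Spec_foo x loops out) := by unfold Spec_foo; infer_instance

-- ===== CLAIM (what is proved, stated in full; the proofs are below) =====
def Claim_equal_foo : Prop := ∀ (x : Int) (loops : Int), Dom_foo x loops → Spec_foo x loops (foo x loops)

-- ===== LEMMAS AND PROOFS =====

-- ===== VERDICT (by name: the statement is the Claim_ definition above) =====
theorem foo_spec : Claim_equal_foo := by
  intro x loops _
  unfold Spec_foo foo foo_alt
  by_cases h : loops ≤ 0
  · rw [PySem.List.pyRange_one_eq_nil (by omega)]
    simp [h]
  · have heq : PySem.List.pyRange 0 loops 1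
        = PySem.List.pyRange 0 (loops - 1) 1 ++ [loops - 1] := by
      have := PySem.List.pyRange_one_succ_right (a := 0) (b := loops - 1) (by omega)
      simpa using this
    rw [heq, List.foldl_append]
    simp only [List.foldl_cons, List.foldl_nil, if_neg h]
    by_cases hm : (654 : Int) ∣ loops - 1 <;> simp [hm]
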